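-- pv_equiv track=rewrite | github.com/LuisDee/nl2sql | scripts/enrich_descriptions.py | build_proto_description_map
-- ===== SOURCE A (Python) =====
-- from typing import Any
--
-- def build_proto_description_map(
--     proto_messages: dict[str, list[dict[str, Any]]],
-- ) -> dict[str, dict[str, Any]]:
--     """Build mapping from proto field name -> {comment, type, message_name}.
--
--     Handles VtCommon embedding: VtCommon fields are indexed under their own
--     names and will be used for columns that come from the props.* path.
--     """
--     result: dict[str, dict[str, Any]] = {}
--
--     for msg_name, fields in proto_messages.items():
--         for field in fields:
--             fname = field["name"]
--             comment = field.get("comment", "").strip()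
--             if not comment:
--                 continue  # no description to use
--             entry = {
--                 "comment": comment,
--                 "type": field.get("type", ""),
--                 "message": msg_name,
--             }
--             # VtCommon fields used across many tables, store with message context
--             if fname not in result:
--                 result[fname] = entry
--             elif msg_name == "VtCommon":
--                 # VtCommon is the canonical source for shared fields
--                 result[fname] = entry
--
--     return result
-- ===== SOURCE B (Python) =====
-- from typing import Any
--
--
-- def build_proto_description_map(
--     proto_messages: dict[str, list[dict[str, Any]]],
-- ) -> dict[str, dict[str, Any]]:
--     """Two-phase build: first-write-wins base pass over every message,
--     then a VtCommon override pass that overwrites values in place."""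
--     result: dict[str, dict[str, Any]] = {}
--     # Phase 1: first occurrence of each field name wins (fixes key order too).
--     for msg_name, fields in proto_messages.items():
--         for field in fields:
--             fname = field["name"]
--             comment = field.get("comment", "").strip()
--             if comment and fname not in result:
--                 result[fname] = {
--                     "comment": comment,
--                     "type": field.get("type", ""),
--                     "message": msg_name,
--                 }
--     # Phase 2: VtCommon is canonical — overwrite values (positions kept).
--     for field in proto_messages.get("VtCommon", []):
--         fname = field["name"]
--         comment = field.get("comment", "").strip()
--         if comment:
--             result[fname] = {
--                 "comment": comment,
--                 "type": field.get("type", ""),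
--                 "message": "VtCommon",
--             }
--     return result
-- ===== Notes on version B (the rewrite author's own statement) =====
-- stated objective: alternative
-- what changed: A decides insert-vs-VtCommon-overwrite with an inline branch inside one pass; B splits the work into two phases: a first-write-wins pass over all messages followed by a separate VtCommon override pass that overwrites values in place.
import Mathlib
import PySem

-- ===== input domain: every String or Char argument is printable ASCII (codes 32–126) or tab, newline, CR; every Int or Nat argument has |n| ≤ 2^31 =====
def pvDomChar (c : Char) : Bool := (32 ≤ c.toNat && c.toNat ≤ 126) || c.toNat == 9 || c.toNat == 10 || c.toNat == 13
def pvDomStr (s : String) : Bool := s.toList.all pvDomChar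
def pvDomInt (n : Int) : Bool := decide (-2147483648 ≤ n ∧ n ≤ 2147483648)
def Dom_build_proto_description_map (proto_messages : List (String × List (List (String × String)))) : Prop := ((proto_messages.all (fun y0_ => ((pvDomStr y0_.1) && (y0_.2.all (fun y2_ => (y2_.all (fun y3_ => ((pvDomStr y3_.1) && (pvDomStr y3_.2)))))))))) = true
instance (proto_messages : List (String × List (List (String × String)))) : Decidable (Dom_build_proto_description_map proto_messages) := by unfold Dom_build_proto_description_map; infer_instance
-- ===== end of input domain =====

-- B replaces A's inline "insert-or-VtCommon-overwrite" branch by two phases: a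
-- first-write-wins pass over all messages, then a VtCommon override pass
-- (objective: alternative decomposition; same cost).

-- ===== PORT A =====
-- one field of A's inner loop body (field["name"] raises KeyError when absent: excluded by Pre_)
def pvStepA (msg : String) (r : PySem.Dict String (List (String × String)))
    (field : List (String × String)) : PySem.Dict String (List (String × String)) :=
  match (PySem.Dict.mk field).get? "name" with
  | none => r  -- Python raises KeyError here; such inputs are outside Pre_
  | some fname =>
    let comment := PySem.Str.strip ((PySem.Dict.mk field).getD "comment" "")
    if comment = "" then r  -- continue
    else
      let entry := [("comment", comment), ("type", (PySem.Dict.mk field).getD "type" ""), ("message", msg)]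
      if (PySem.Dict.contains r fname) = false then PySem.Dict.insert r fname entry
      else if msg = "VtCommon" then PySem.Dict.insert r fname entry
      else r

def build_proto_description_map (proto_messages : List (String × List (List (String × String)))) : List (String × List (String × String)) :=
  (proto_messages.foldl (fun r p => p.2.foldl (pvStepA p.1) r) PySem.Dict.empty).items

-- ===== PORT B =====
-- phase-1 step: insert only if the name is not yet present
def pvStepB (msg : String) (r : PySem.Dict String (List (String × String)))
    (field : List (String × String)) : PySem.Dict String (List (String × String)) :=
  match (PySem.Dict.mk field).get? "name" with
  | none => r  -- Python raises KeyError here; such inputs are outside Pre_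
  | some fname =>
    let comment := PySem.Str.strip ((PySem.Dict.mk field).getD "comment" "")
    if comment = "" then r
    else if PySem.Dict.contains r fname then r
    else PySem.Dict.insert r fname [("comment", comment), ("type", (PySem.Dict.mk field).getD "type" ""), ("message", msg)]

-- phase-2 step: unconditional overwrite from a VtCommon field
def pvStepV (r : PySem.Dict String (List (String × String)))
    (field : List (String × String)) : PySem.Dict String (List (String × String)) :=
  match (PySem.Dict.mk field).get? "name" with
  | none => r  -- Python raises KeyError here; such inputs are outside Pre_
  | some fname =>
    let comment := PySem.Str.strip ((PySem.Dict.mk field).getD "comment" "")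
    if comment = "" then r
    else PySem.Dict.insert r fname [("comment", comment), ("type", (PySem.Dict.mk field).getD "type" ""), ("message", "VtCommon")]

def build_proto_description_map_alt (proto_messages : List (String × List (List (String × String)))) : List (String × List (String × String)) :=
  let base := proto_messages.foldl (fun r p => p.2.foldl (pvStepB p.1) r) PySem.Dict.empty
  (((PySem.Dict.mk proto_messages).getD "VtCommon" []).foldl pvStepV base).items

-- ===== PRECONDITION & SPEC =====
-- Pre_ excludes (a) association lists with duplicate message names or duplicate
-- keys inside a field dict — those do not represent any Python dict (Python
-- dict construction collapses duplicates last-wins, first-match lookup here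
-- would disagree), and (b) fields without a "name" key, on which A raises
-- KeyError.
def Pre_build_proto_description_map (proto_messages : List (String × List (List (String × String)))) : Prop :=
  (proto_messages.map Prod.fst).Nodup ∧
  ∀ p ∈ proto_messages, ∀ f ∈ p.2, (f.map Prod.fst).Nodup ∧ (PySem.Dict.contains (PySem.Dict.mk f) "name") = true
instance (proto_messages : List (String × List (List (String × String)))) : Decidable (Pre_build_proto_description_map proto_messages) := by unfold Pre_build_proto_description_map; infer_instance

def pvWitness_build_proto_description_map : (List (String × List (List (String × String)))) :=
  [("VtCommon", [[("name", "id"), ("comment", " shared id ")]]),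
   ("Msg", [[("name", "id"), ("comment", "local id"), ("type", "int")], [("name", "x"), ("comment", "")]])]

def Spec_build_proto_description_map (proto_messages : List (String × List (List (String × String)))) (out : List (String × List (String × String))) : Prop := out = build_proto_description_map_alt proto_messages
instance (proto_messages : List (String × List (List (String × String)))) (out : List (String × List (String × String))) : Decidable (Spec_build_proto_description_map proto_messages out) := by unfold Spec_build_proto_description_map; infer_instance

-- ===== CLAIM (what is proved, stated in full; the proofs are below) =====
def Claim_equal_build_proto_description_map : Prop := ∀ (proto_messages : List (String × List (List (String × String)))), Dom_build_proto_description_map proto_messages → Pre_build_proto_description_map proto_messages → Spec_build_proto_description_map proto_messages (build_proto_description_map proto_messages)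

-- ===== LEMMAS AND PROOFS =====

-- abbreviations for the two message-level folds
def pvFoldA (r : PySem.Dict String (List (String × String))) (pm : List (String × List (List (String × String)))) : PySem.Dict String (List (String × String)) :=
  pm.foldl (fun r p => p.2.foldl (pvStepA p.1) r) r

def pvFoldB (r : PySem.Dict String (List (String × String))) (pm : List (String × List (List (String × String)))) : PySem.Dict String (List (String × String)) :=
  pm.foldl (fun r p => p.2.foldl (pvStepB p.1) r) r

theorem pvStepA_eq_stepB (msg : String) (h : msg ≠ "VtCommon") (r : PySem.Dict String (List (String × String))) (f : List (String × String)) :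
    pvStepA msg r f = pvStepB msg r f := by
  unfold pvStepA pvStepB
  cases (PySem.Dict.mk f).get? "name" with
  | none => rfl
  | some fname =>
    simp only
    split_ifs <;> simp_all

theorem pvStepA_vt (r : PySem.Dict String (List (String × String))) (f : List (String × String)) :
    pvStepA "VtCommon" r f = pvStepV r f := by
  unfold pvStepA pvStepV
  cases (PySem.Dict.mk f).get? "name" with
  | none => rfl
  | some fname =>
    simp only
    split_ifs <;> simp_all

theorem pvContains_stepB (msg : String) (r : PySem.Dict String (List (String × String))) (f : List (String × String))
    (k : String) (h : PySem.Dict.contains r k = true) : PySem.Dict.contains (pvStepB msg r f) k = true := by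
  unfold pvStepB
  cases (PySem.Dict.mk f).get? "name" with
  | none => exact h
  | some fname =>
    simp only
    split_ifs with h1 h2
    · exact h
    · exact h
    · simp [PySem.Dict.contains_insert, h]

theorem pvInsert_comm (r : PySem.Dict String (List (String × String))) (k k' : String)
    (v v' : List (String × String)) (hk : PySem.Dict.contains r k = true)
    (hk' : PySem.Dict.contains r k' = false) (hne : k' ≠ k) :
    PySem.Dict.insert (PySem.Dict.insert r k v) k' v' = PySem.Dict.insert (PySem.Dict.insert r k' v') k v := by
  apply PySem.Dict.ext
  have h1 : PySem.Dict.contains (PySem.Dict.insert r k v) k' = false := by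
    simp [PySem.Dict.contains_insert, hk', hne]
  have h2 : PySem.Dict.contains (PySem.Dict.insert r k' v') k = true := by
    simp [PySem.Dict.contains_insert, hk]
  rw [PySem.Dict.items_insert_of_not_contains _ _ h1, PySem.Dict.items_insert_of_contains _ _ hk,
      PySem.Dict.items_insert_of_contains _ _ h2, PySem.Dict.items_insert_of_not_contains _ _ hk']
  simp [List.map_append, hne]

theorem pvInsert_stepB (msg : String) (r : PySem.Dict String (List (String × String))) (f : List (String × String))
    (k : String) (v : List (String × String)) (h : PySem.Dict.contains r k = true) :
    pvStepB msg (PySem.Dict.insert r k v) f = PySem.Dict.insert (pvStepB msg r f) k v := by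
  unfold pvStepB
  cases (PySem.Dict.mk f).get? "name" with
  | none => rfl
  | some fname =>
    simp only
    by_cases hc : PySem.Str.strip ((PySem.Dict.mk f).getD "comment" "") = ""
    · simp [hc]
    · by_cases hek : fname = k
      · subst hek
        simp [hc, h]
      · rw [if_neg hc, if_neg hc]
        have : PySem.Dict.contains (PySem.Dict.insert r k v) fname = PySem.Dict.contains r fname := by
          simp [PySem.Dict.contains_insert, hek]
        rw [this]
        by_cases hcf : PySem.Dict.contains r fname
        · simp [hcf]
        · simp only [hcf, Bool.false_eq_true, if_false]
          exact pvInsert_comm r k fname v _ h (by simpa using hcf) hek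

theorem pvInsert_foldB_fields (msg : String) (fs : List (List (String × String)))
    (r : PySem.Dict String (List (String × String))) (k : String) (v : List (String × String))
    (h : PySem.Dict.contains r k = true) :
    fs.foldl (pvStepB msg) (PySem.Dict.insert r k v) = PySem.Dict.insert (fs.foldl (pvStepB msg) r) k v := by
  induction fs generalizing r with
  | nil => rfl
  | cons f rest ih =>
    simp only [List.foldl_cons]
    rw [pvInsert_stepB msg r f k v h]
    exact ih (pvStepB msg r f) (pvContains_stepB msg r f k h)

theorem pvContains_foldB_fields (msg : String) (fs : List (List (String × String)))
    (r : PySem.Dict String (List (String × String))) (k : String)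
    (h : PySem.Dict.contains r k = true) :
    PySem.Dict.contains (fs.foldl (pvStepB msg) r) k = true := by
  induction fs generalizing r with
  | nil => exact h
  | cons f rest ih => exact ih _ (pvContains_stepB msg r f k h)

theorem pvInsert_foldB (pm : List (String × List (List (String × String))))
    (r : PySem.Dict String (List (String × String))) (k : String) (v : List (String × String))
    (h : PySem.Dict.contains r k = true) :
    pvFoldB (PySem.Dict.insert r k v) pm = PySem.Dict.insert (pvFoldB r pm) k v := by
  induction pm generalizing r with
  | nil => rfl
  | cons p rest ih =>
    unfold pvFoldB
    simp only [List.foldl_cons]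
    rw [pvInsert_foldB_fields p.1 p.2 r k v h]
    exact ih _ (pvContains_foldB_fields p.1 p.2 r k h)

theorem pvFoldA_eq_foldB (pm : List (String × List (List (String × String))))
    (r : PySem.Dict String (List (String × String)))
    (h : "VtCommon" ∉ pm.map Prod.fst) :
    pvFoldA r pm = pvFoldB r pm := by
  induction pm generalizing r with
  | nil => rfl
  | cons p rest ih =>
    have hm : p.1 ≠ "VtCommon" := by
      intro hc; exact h (by simp [hc])
    have hstep : pvStepA p.1 = pvStepB p.1 := funext fun r => funext fun f => pvStepA_eq_stepB p.1 hm r f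
    unfold pvFoldA pvFoldB
    simp only [List.foldl_cons, hstep]
    exact ih _ (by intro hc; exact h (by simp [hc]))

-- the VtCommon message itself: A's inline pass = B's insert-if-absent pass followed by the override pass
theorem pvVt_two_phase (fs : List (List (String × String))) (r : PySem.Dict String (List (String × String))) :
    fs.foldl (pvStepA "VtCommon") r = fs.foldl pvStepV (fs.foldl (pvStepB "VtCommon") r) := by
  induction fs generalizing r with
  | nil => rfl
  | cons f rest ih =>
    simp only [List.foldl_cons, pvStepA_vt]
    rcases hn : (PySem.Dict.mk f).get? "name" with _ | fname
    · have hV : pvStepV r f = r := by unfold pvStepV; rw [hn]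
      have hB : pvStepB "VtCommon" r f = r := by unfold pvStepB; rw [hn]
      have hV2 : ∀ x, pvStepV x f = x := by intro x; unfold pvStepV; rw [hn]
      rw [hV, hB, ih r, hV2]
    · by_cases hc : PySem.Str.strip ((PySem.Dict.mk f).getD "comment" "") = ""
      · have hV : ∀ x, pvStepV x f = x := by intro x; unfold pvStepV; rw [hn]; simp [hc]
        have hB : pvStepB "VtCommon" r f = r := by unfold pvStepB; rw [hn]; simp [hc]
        rw [hV, hB, ih r, hV]
      · set e : List (String × String) := [("comment", PySem.Str.strip ((PySem.Dict.mk f).getD "comment" "")), ("type", (PySem.Dict.mk f).getD "type" ""), ("message", "VtCommon")] with he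
        have hV : ∀ x, pvStepV x f = PySem.Dict.insert x fname e := by
          intro x; unfold pvStepV; rw [hn]; simp [hc, he]
        have hB : pvStepB "VtCommon" r f =
            if PySem.Dict.contains r fname then r else PySem.Dict.insert r fname e := by
          unfold pvStepB; rw [hn]; simp [hc, he]
        have hsc : PySem.Dict.contains (pvStepB "VtCommon" r f) fname = true := by
          rw [hB]; split_ifs with h1
          · exact h1
          · simp
        have hse : PySem.Dict.insert (pvStepB "VtCommon" r f) fname e = PySem.Dict.insert r fname e := by
          rw [hB]; split_ifs with h1
          · rfl
          · exact PySem.Dict.insert_insert_self _ _ _ _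
        rw [hV, hV, ← pvInsert_foldB_fields "VtCommon" rest (pvStepB "VtCommon" r f) fname e hsc, hse]
        exact ih (PySem.Dict.insert r fname e)

-- every non-skipped VtCommon field name is already present after phase 1 on those fields
theorem pvContains_after_fields (fs : List (List (String × String))) (r : PySem.Dict String (List (String × String)))
    (f : List (String × String)) (hf : f ∈ fs) (k : String)
    (hn : (PySem.Dict.mk f).get? "name" = some k)
    (hc : PySem.Str.strip ((PySem.Dict.mk f).getD "comment" "") ≠ "") :
    PySem.Dict.contains (fs.foldl (pvStepB "VtCommon") r) k = true := by
  induction fs generalizing r with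
  | nil => cases hf
  | cons g rest ih =>
    simp only [List.foldl_cons]
    rcases List.mem_cons.mp hf with hEq | hmem
    · subst hEq
      apply pvContains_foldB_fields
      unfold pvStepB
      rw [hn]
      simp only [hc, if_false]
      split_ifs with h1
      · exact h1
      · simp
    · exact ih _ hmem

-- the override pass commutes out through later messages' phase-1 folds
theorem pvFoldV_comm (fs : List (List (String × String))) (pm : List (String × List (List (String × String))))
    (r : PySem.Dict String (List (String × String)))
    (h : ∀ f ∈ fs, ∀ k, (PySem.Dict.mk f).get? "name" = some k →
         PySem.Str.strip ((PySem.Dict.mk f).getD "comment" "") ≠ "" → PySem.Dict.contains r k = true) :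
    pvFoldB (fs.foldl pvStepV r) pm = fs.foldl pvStepV (pvFoldB r pm) := by
  induction fs generalizing r with
  | nil => rfl
  | cons f rest ih =>
    simp only [List.foldl_cons]
    rcases hn : (PySem.Dict.mk f).get? "name" with _ | fname
    · have hV : ∀ x, pvStepV x f = x := by intro x; unfold pvStepV; rw [hn]
      rw [hV, hV]
      exact ih r (fun g hg => h g (List.mem_cons_of_mem f hg))
    · by_cases hc : PySem.Str.strip ((PySem.Dict.mk f).getD "comment" "") = ""
      · have hV : ∀ x, pvStepV x f = x := by intro x; unfold pvStepV; rw [hn]; simp [hc]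
        rw [hV, hV]
        exact ih r (fun g hg => h g (List.mem_cons_of_mem f hg))
      · set e : List (String × String) := [("comment", PySem.Str.strip ((PySem.Dict.mk f).getD "comment" "")), ("type", (PySem.Dict.mk f).getD "type" ""), ("message", "VtCommon")] with he
        have hV : ∀ x, pvStepV x f = PySem.Dict.insert x fname e := by
          intro x; unfold pvStepV; rw [hn]; simp [hc, he]
        have hk : PySem.Dict.contains r fname = true := h f (List.mem_cons_self) fname hn hc
        rw [hV, hV]
        have hmono : ∀ g ∈ rest, ∀ k, (PySem.Dict.mk g).get? "name" = some k →
            PySem.Str.strip ((PySem.Dict.mk g).getD "comment" "") ≠ "" →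
            PySem.Dict.contains (PySem.Dict.insert r fname e) k = true := by
          intro g hg k hgn hgc
          have := h g (List.mem_cons_of_mem f hg) k hgn hgc
          simp [PySem.Dict.contains_insert, this]
        rw [ih _ hmono, pvInsert_foldB pm r fname e hk]

-- first-occurrence decomposition of a list at a key
theorem pvSplit_first (pm : List (String × List (List (String × String)))) (k : String)
    (h : k ∈ pm.map Prod.fst) :
    ∃ pre fs post, pm = pre ++ (k, fs) :: post ∧ k ∉ pre.map Prod.fst := by
  induction pm with
  | nil => simp at h
  | cons p rest ih =>
    by_cases hp : p.1 = k
    · exact ⟨[], p.2, rest, by simp [← hp], by simp⟩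
    · have : k ∈ rest.map Prod.fst := by
        rcases List.mem_map.mp h with ⟨q, hq, hq1⟩
        rcases List.mem_cons.mp hq with rfl | hq'
        · exact absurd hq1 hp
        · exact hq1 ▸ List.mem_map_of_mem (f := Prod.fst) hq'
      rcases ih this with ⟨pre, fs, post, h1, h2⟩
      refine ⟨p :: pre, fs, post, by simp [h1], ?_⟩
      simp only [List.map_cons, List.mem_cons]
      rintro (hc | hc)
      · exact hp hc.symm
      · exact h2 hc

-- first-match lookup in the message dict along the decomposition
theorem pvGetD_mk (pre : List (String × List (List (String × String)))) (fs : List (List (String × String)))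
    (post : List (String × List (List (String × String))))
    (h : "VtCommon" ∉ pre.map Prod.fst) :
    (PySem.Dict.mk (pre ++ ("VtCommon", fs) :: post)).getD "VtCommon" [] = fs := by
  induction pre with
  | nil =>
    simp [PySem.Dict.getD_eq_get?_getD, PySem.Dict.get?_mk_cons]
  | cons p rest ih =>
    have hp : p.1 ≠ "VtCommon" := fun hc => h (by simp [hc])
    have hr : "VtCommon" ∉ rest.map Prod.fst := fun hc => h (by simp [hc])
    have : (PySem.Dict.mk ((p :: rest) ++ ("VtCommon", fs) :: post)) = PySem.Dict.mk ((p.1, p.2) :: (rest ++ ("VtCommon", fs) :: post)) := by simp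
    rw [this, PySem.Dict.getD_eq_get?_getD, PySem.Dict.get?_mk_cons]
    simp only [beq_iff_eq, hp, if_false]
    rw [← PySem.Dict.getD_eq_get?_getD]
    exact ih hr

theorem pvGetD_mk_none (pm : List (String × List (List (String × String))))
    (h : "VtCommon" ∉ pm.map Prod.fst) :
    (PySem.Dict.mk pm).getD "VtCommon" [] = [] := by
  induction pm with
  | nil => rfl
  | cons p rest ih =>
    have hp : p.1 ≠ "VtCommon" := fun hc => h (by simp [hc])
    have : (PySem.Dict.mk (p :: rest)) = PySem.Dict.mk ((p.1, p.2) :: rest) := by simp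
    rw [this, PySem.Dict.getD_eq_get?_getD, PySem.Dict.get?_mk_cons]
    simp only [beq_iff_eq, hp, if_false]
    rw [← PySem.Dict.getD_eq_get?_getD]
    exact ih (fun hc => h (by simp [hc]))

-- ===== VERDICT (by name: the statement is the Claim_ definition above) =====
theorem build_proto_description_map_spec : Claim_equal_build_proto_description_map := by
  intro pm _ hpre
  unfold Spec_build_proto_description_map build_proto_description_map build_proto_description_map_alt
  obtain ⟨hnd, _⟩ := hpre
  by_cases hv : "VtCommon" ∈ pm.map Prod.fst
  · rcases pvSplit_first pm "VtCommon" hv with ⟨pre, fs, post, rfl, hpre'⟩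
    have hpost : "VtCommon" ∉ post.map Prod.fst := by
      have h2 := hnd
      simp only [List.map_append, List.map_cons] at h2
      exact (List.nodup_cons.mp h2.of_append_right).1
    rw [pvGetD_mk pre fs post hpre']
    show (((pre ++ ("VtCommon", fs) :: post).foldl (fun r p => p.2.foldl (pvStepA p.1) r) PySem.Dict.empty)).items = _
    have hA : (pre ++ ("VtCommon", fs) :: post).foldl (fun r p => p.2.foldl (pvStepA p.1) r) PySem.Dict.empty
        = pvFoldA (fs.foldl (pvStepA "VtCommon") (pvFoldA PySem.Dict.empty pre)) post := by
      simp [pvFoldA, List.foldl_append]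
    have hB : (pre ++ ("VtCommon", fs) :: post).foldl (fun r p => p.2.foldl (pvStepB p.1) r) PySem.Dict.empty
        = pvFoldB (fs.foldl (pvStepB "VtCommon") (pvFoldB PySem.Dict.empty pre)) post := by
      simp [pvFoldB, List.foldl_append]
    rw [hA, hB]
    rw [pvFoldA_eq_foldB pre PySem.Dict.empty hpre']
    set d0 := pvFoldB PySem.Dict.empty pre with hd0
    rw [pvVt_two_phase fs d0, pvFoldA_eq_foldB post _ hpost]
    rw [pvFoldV_comm fs post (fs.foldl (pvStepB "VtCommon") d0)
      (fun f hf k hn hc => pvContains_after_fields fs d0 f hf k hn hc)]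
  · rw [pvGetD_mk_none pm hv]
    show ((pm.foldl (fun r p => p.2.foldl (pvStepA p.1) r) PySem.Dict.empty)).items = _
    have := pvFoldA_eq_foldB pm PySem.Dict.empty hv
    unfold pvFoldA pvFoldB at this
    rw [this]
    rfl
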